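-- pv_equiv track=rewrite | github.com/bingzhong-project/leetcode | algorithms/longest-well-performing-interval/src/Solution.py | longestWPI
-- ===== SOURCE A (Python) =====
-- def longestWPI(hours: list) -> int:
--     sum_array = [0 for _ in range(len(hours) + 1)]
--     for i in range(1, len(sum_array)):
--         sum_array[i] = sum_array[i - 1] + (1 if hours[i - 1] > 8 else -1)
--     stack = []
--     for i in range(len(sum_array)):
--         if not stack or sum_array[stack[-1]] > sum_array[i]:
--             stack.append(i)
--
--     res = 0
--     for i in range(len(sum_array) - 1, -1, -1):
--         while stack and sum_array[stack[-1]] < sum_array[i]: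
--             res = max(res, i - stack.pop())
--     return res
-- ===== SOURCE B (Python) =====
-- def longestWPI(hours: list) -> int:
--     # Brute force over prefix scores: P[j]-P[i] > 0 iff days i..j-1 are well-performing.
--     p = [0]
--     for h in hours:
--         p.append(p[-1] + (1 if h > 8 else -1))
--     res = 0
--     for j in range(len(p)):
--         for i in range(j):
--             if p[i] < p[j]:
--                 res = max(res, j - i)
--     return res
-- ===== Notes on version B (the rewrite author's own statement) =====
-- stated objective: simpler
-- what changed: Replaces A's prefix-sum array + monotonic stack + backward popping pass by a direct two-loop maximisation over prefix-score pairs (no stack, no backward pass).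
import Mathlib
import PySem

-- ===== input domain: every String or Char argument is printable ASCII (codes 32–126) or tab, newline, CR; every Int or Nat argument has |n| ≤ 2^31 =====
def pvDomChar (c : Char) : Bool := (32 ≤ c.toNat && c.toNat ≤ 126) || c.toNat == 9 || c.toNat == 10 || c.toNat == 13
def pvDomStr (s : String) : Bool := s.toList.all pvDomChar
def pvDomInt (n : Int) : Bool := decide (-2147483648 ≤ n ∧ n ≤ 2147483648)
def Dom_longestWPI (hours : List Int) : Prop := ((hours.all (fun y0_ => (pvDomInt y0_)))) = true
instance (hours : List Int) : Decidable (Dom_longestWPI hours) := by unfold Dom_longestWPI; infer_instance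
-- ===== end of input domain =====

-- B replaces A's prefix-sum array + monotonic stack + backward popping pass by a direct
-- two-loop maximisation over prefix-score pairs (simpler, not faster).

-- ===== PORT A =====
-- (1 if h > 8 else -1), shared by both ports
def pyStep (h : Int) : Int := if h > 8 then 1 else -1

-- sum_array = [0]*(n+1); for i in range(1, len(sum_array)): sum_array[i] = sum_array[i-1] + step
def buildSumArray (hours : List Int) : List Int :=
  (List.range' 1 hours.length).foldl
    (fun sa i => sa.set i (sa.getD (i - 1) 0 + pyStep (hours.getD (i - 1) 0)))
    (List.replicate (hours.length + 1) 0)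

-- if not stack or sum_array[stack[-1]] > sum_array[i]: stack.append(i)
-- (the Lean stack keeps the Python list's top — its last element — at the head)
def stackPush (sa : List Int) (stack : List Nat) (i : Nat) : List Nat :=
  match stack with
  | [] => [i]
  | t :: _ => if sa.getD t 0 > sa.getD i 0 then i :: stack else stack

def buildStack (sa : List Int) : List Nat :=
  (List.range sa.length).foldl (stackPush sa) []

-- while stack and sum_array[stack[-1]] < sum_array[i]: res = max(res, i - stack.pop())
def popLoop (sa : List Int) (i : Nat) : List Nat → Int → List Nat × Int
  | [], res => ([], res)
  | t :: rest, res =>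
    if sa.getD t 0 < sa.getD i 0 then popLoop sa i rest (max res ((i : Int) - (t : Int)))
    else (t :: rest, res)

def longestWPI (hours : List Int) : Int :=
  let sa := buildSumArray hours
  (((List.range sa.length).reverse).foldl (fun st i => popLoop sa i st.1 st.2)
    (buildStack sa, 0)).2

-- ===== PORT B =====
-- p = [0]; for h in hours: p.append(p[-1] + (1 if h > 8 else -1))
def buildP (hours : List Int) : List Int :=
  hours.foldl (fun p h => p ++ [p.getLastD 0 + pyStep h]) [0]

-- if p[i] < p[j]: res = max(res, j - i)
def innerF (p : List Int) (j : Nat) : Int → Nat → Int := fun res i =>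
  if p.getD i 0 < p.getD j 0 then max res ((j : Int) - (i : Int)) else res

def longestWPI_alt (hours : List Int) : Int :=
  let p := buildP hours
  (List.range p.length).foldl (fun res j => (List.range j).foldl (innerF p j) res) 0

-- ===== PRECONDITION & SPEC =====
def Spec_longestWPI (hours : List Int) (out : Int) : Prop := out = longestWPI_alt hours
instance (hours : List Int) (out : Int) : Decidable (Spec_longestWPI hours out) := by unfold Spec_longestWPI; infer_instance

-- ===== CLAIM (what is proved, stated in full; the proofs are below) =====
def Claim_equal_longestWPI : Prop := ∀ (hours : List Int), Dom_longestWPI hours → Spec_longestWPI hours (longestWPI hours)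

-- ===== LEMMAS AND PROOFS =====

-- value of the prefix array at index i
abbrev vAt (s : List Int) (i : Nat) : Int := s.getD i 0

-- relation along the stack (head first): later-pushed elements have larger index, smaller value
def stackRel (s : List Int) (a b : Nat) : Prop := b < a ∧ vAt s a < vAt s b

-- the stack after the first k indices were offered
def stkUpTo (s : List Int) (k : Nat) : List Nat := (List.range k).foldl (stackPush s) []

-- the backward loop over indices k-1, …, 0
def backFold (s : List Int) (k : Nat) (st : List Nat × Int) : List Nat × Int :=
  ((List.range k).reverse).foldl (fun st i => popLoop s i st.1 st.2) st

-- the brute-force maximisation (port B's loops) over an arbitrary prefix array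
def bruteRes (s : List Int) : Int :=
  (List.range s.length).foldl (fun res j => (List.range j).foldl (innerF s j) res) 0

-- all pairs i<j with vAt i < vAt j have length ≤ M
def PairBound (s : List Int) (M : Int) : Prop :=
  ∀ i j : Nat, i < j → j < s.length → vAt s i < vAt s j → (j : Int) - (i : Int) ≤ M

-- ---------- generic foldl lemmas ----------
theorem foldl_ge_start {α : Type} (f : Int → α → Int) (h : ∀ r x, r ≤ f r x) :
    ∀ (l : List α) (r : Int), r ≤ l.foldl f r := by
  intro l
  induction l with
  | nil => intro r; exact le_refl r
  | cons x t ih => intro r; exact le_trans (h r x) (ih (f r x))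

theorem foldl_le_bound {α : Type} (f : Int → α → Int) (R : Int) (l : List α)
    (h : ∀ r x, r ≤ R → x ∈ l → f r x ≤ R) :
    ∀ r, r ≤ R → l.foldl f r ≤ R := by
  induction l with
  | nil => intro r hr; exact hr
  | cons x t ih =>
    intro r hr
    exact ih (fun r' x' hr' hx' => h r' x' hr' (List.mem_cons_of_mem x hx'))
      (f r x) (h r x hr (List.mem_cons_self))

theorem foldl_ge_elem {α : Type} [DecidableEq α] (f : Int → α → Int)
    (mono : ∀ r x, r ≤ f r x) (c : Int) (x : α) (hc : ∀ r, c ≤ f r x) :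
    ∀ (l : List α) (r : Int), x ∈ l → c ≤ l.foldl f r := by
  intro l
  induction l with
  | nil => intro r hx; cases hx
  | cons y t ih =>
    intro r hx
    by_cases hxy : x = y
    · subst hxy
      exact le_trans (hc r) (foldl_ge_start f mono t (f r x))
    · exact ih (f r y) (List.mem_of_ne_of_mem hxy hx)

-- ---------- brute-force lemmas ----------
theorem innerF_mono (p : List Int) (j : Nat) : ∀ r i, r ≤ innerF p j r i := by
  intro r i
  unfold innerF
  split
  · exact le_max_left _ _
  · exact le_refl r

theorem outer_mono (p : List Int) : ∀ (r : Int) (j : Nat),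
    r ≤ (List.range j).foldl (innerF p j) r :=
  fun r j => foldl_ge_start _ (innerF_mono p j) _ r

theorem bruteRes_nonneg (s : List Int) : 0 ≤ bruteRes s :=
  foldl_ge_start _ (outer_mono s) _ 0

theorem bruteRes_pairBound (s : List Int) : PairBound s (bruteRes s) := by
  intro i j hij hj hv
  unfold bruteRes
  apply foldl_ge_elem _ (outer_mono s) _ j
  · intro r
    apply foldl_ge_elem _ (innerF_mono s j) _ i
    · intro r'
      unfold innerF
      rw [if_pos hv]
      exact le_max_right _ _
    · exact List.mem_range.mpr hij
  · exact List.mem_range.mpr hj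

theorem bruteRes_le (s : List Int) (R : Int) (h0 : 0 ≤ R) (hp : PairBound s R) :
    bruteRes s ≤ R := by
  unfold bruteRes
  apply foldl_le_bound _ _ _ _ 0 h0
  intro r j hr hj
  apply foldl_le_bound _ _ _ _ r hr
  intro r' i hr' hi
  unfold innerF
  split
  · rename_i hv
    exact max_le hr' (hp i j (List.mem_range.mp hi) (List.mem_range.mp hj) hv)
  · exact hr'

-- ---------- stack-building lemmas ----------
theorem stkUpTo_succ (s : List Int) (k : Nat) :
    stkUpTo s (k + 1) = stackPush s (stkUpTo s k) k := by
  unfold stkUpTo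
  rw [List.range_succ, List.foldl_append]
  rfl

theorem stkUpTo_inv (s : List Int) : ∀ k : Nat,
    List.Pairwise (stackRel s) (stkUpTo s k) ∧
    (∀ t ∈ stkUpTo s k, t < k) ∧
    (∀ i < k, ∃ t ∈ stkUpTo s k, t ≤ i ∧ vAt s t ≤ vAt s i) := by
  intro k
  induction k with
  | zero => exact ⟨List.Pairwise.nil, by simp [stkUpTo], by omega⟩
  | succ k ih =>
    obtain ⟨hpw, hlt, hcov⟩ := ih
    rw [stkUpTo_succ]
    cases hst : stkUpTo s k with
    | nil =>
      rw [hst] at hcov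
      simp only [stackPush]
      refine ⟨List.pairwise_singleton _ _, by simp, ?_⟩
      intro i hi
      rcases Nat.lt_succ_iff_lt_or_eq.mp hi with h | h
      · exact absurd (hcov i h) (by simp)
      · subst h; exact ⟨i, by simp, le_refl _, le_refl _⟩
    | cons t rest =>
      rw [hst] at hpw hlt hcov
      simp only [stackPush]
      by_cases hv : vAt s t > vAt s k
      · rw [if_pos hv]
        refine ⟨?_, ?_, ?_⟩
        · refine List.pairwise_cons.mpr ⟨?_, hpw⟩
          intro b hb
          refine ⟨hlt b hb, ?_⟩
          rcases List.mem_cons.mp hb with h | h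
          · subst h; exact hv
          · exact lt_trans hv ((List.pairwise_cons.mp hpw).1 b h).2
        · intro u hu
          rcases List.mem_cons.mp hu with h | h
          · omega
          · exact Nat.lt_succ_of_lt (hlt u h)
        · intro i hi
          rcases Nat.lt_succ_iff_lt_or_eq.mp hi with h | h
          · obtain ⟨u, hu, h1, h2⟩ := hcov i h
            exact ⟨u, List.mem_cons_of_mem _ hu, h1, h2⟩
          · subst h; exact ⟨i, List.mem_cons_self, le_refl _, le_refl _⟩
      · rw [if_neg hv]
        refine ⟨hpw, fun u hu => Nat.lt_succ_of_lt (hlt u hu), ?_⟩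
        intro i hi
        rcases Nat.lt_succ_iff_lt_or_eq.mp hi with h | h
        · exact hcov i h
        · subst h
          exact ⟨t, List.mem_cons_self, le_of_lt (hlt t List.mem_cons_self),
            le_of_not_gt hv⟩

-- ---------- popLoop lemmas ----------
theorem popLoop_res_mono (s : List Int) (i : Nat) :
    ∀ (st : List Nat) (res : Int), res ≤ (popLoop s i st res).2 := by
  intro st
  induction st with
  | nil => intro res; exact le_refl res
  | cons t rest ih =>
    intro res
    unfold popLoop
    split
    · exact le_trans (le_max_left _ _) (ih _)
    · exact le_refl res

theorem popLoop_suffix (s : List Int) (i : Nat) :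
    ∀ (st : List Nat) (res : Int), (popLoop s i st res).1 <:+ st := by
  intro st
  induction st with
  | nil => intro res; exact List.suffix_refl _
  | cons t rest ih =>
    intro res
    unfold popLoop
    split
    · exact (ih _).trans (List.suffix_cons _ _)
    · exact List.suffix_refl _

theorem popLoop_le (s : List Int) (M : Int) (hM : 0 ≤ M) (hp : PairBound s M)
    (i : Nat) (hi : i < s.length) :
    ∀ (st : List Nat) (res : Int), res ≤ M → (popLoop s i st res).2 ≤ M := by
  intro st
  induction st with
  | nil => intro res h; exact h
  | cons t rest ih =>
    intro res hres
    unfold popLoop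
    split
    · rename_i hv
      apply ih
      apply max_le hres
      by_cases hti : t < i
      · exact hp t i hti hi hv
      · have : (i : Int) - (t : Int) ≤ 0 := by omega
        exact le_trans this hM
    · exact hres

theorem popLoop_mem_or (s : List Int) (i : Nat) :
    ∀ (st : List Nat) (res : Int) (t : Nat), t ∈ st →
      t ∈ (popLoop s i st res).1 ∨ (i : Int) - (t : Int) ≤ (popLoop s i st res).2 := by
  intro st
  induction st with
  | nil => intro res t ht; cases ht
  | cons u rest ih =>
    intro res t ht
    unfold popLoop
    split
    · rcases List.mem_cons.mp ht with h | h
      · subst h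
        right
        exact le_trans (le_max_right _ _) (popLoop_res_mono s i rest _)
      · exact ih _ t h
    · left; exact ht

theorem popLoop_pops (s : List Int) (i : Nat) :
    ∀ (st : List Nat) (res : Int) (t : Nat), List.Pairwise (stackRel s) st →
      t ∈ st → vAt s t < vAt s i →
      (i : Int) - (t : Int) ≤ (popLoop s i st res).2 := by
  intro st
  induction st with
  | nil => intro res t _ ht; cases ht
  | cons u rest ih =>
    intro res t hpw ht hv
    unfold popLoop
    split
    · rcases List.mem_cons.mp ht with h | h
      · subst h
        exact le_trans (le_max_right _ _) (popLoop_res_mono s i rest _)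
      · exact ih _ t (List.pairwise_cons.mp hpw).2 h hv
    · rename_i hnv
      exfalso
      rcases List.mem_cons.mp ht with h | h
      · subst h; simp [vAt] at hv hnv; omega
      · have := ((List.pairwise_cons.mp hpw).1 t h).2
        simp [vAt] at this hv hnv
        omega

-- ---------- backward-loop lemmas ----------
theorem backFold_succ (s : List Int) (k : Nat) (st : List Nat × Int) :
    backFold s (k + 1) st = backFold s k (popLoop s k st.1 st.2) := by
  unfold backFold
  rw [List.range_succ, List.reverse_append]
  rfl

theorem backFold_mono (s : List Int) : ∀ (k : Nat) (st : List Nat × Int),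
    st.2 ≤ (backFold s k st).2 := by
  intro k
  induction k with
  | zero => intro st; exact le_refl _
  | succ k ih =>
    intro st
    rw [backFold_succ]
    exact le_trans (popLoop_res_mono s k st.1 st.2) (ih _)

-- stack facts specialised to the full build
theorem buildStack_pairwise (s : List Int) : List.Pairwise (stackRel s) (buildStack s) :=
  (stkUpTo_inv s s.length).1

theorem buildStack_lt (s : List Int) : ∀ t ∈ buildStack s, t < s.length :=
  (stkUpTo_inv s s.length).2.1

theorem buildStack_cov (s : List Int) :
    ∀ i < s.length, ∃ t ∈ buildStack s, t ≤ i ∧ vAt s t ≤ vAt s i :=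
  (stkUpTo_inv s s.length).2.2

theorem backFold_succ' (s : List Int) (k : Nat) (st : List Nat) (res : Int) :
    backFold s (k + 1) (st, res)
      = backFold s k ((popLoop s k st res).1, (popLoop s k st res).2) := by
  rw [backFold_succ]

theorem backFold_mono' (s : List Int) (k : Nat) (a : List Nat) (b : Int) :
    b ≤ (backFold s k (a, b)).2 := backFold_mono s k (a, b)

theorem backFold_main (s : List Int) (M : Int) (hM : 0 ≤ M) (hp : PairBound s M) :
    ∀ (k : Nat) (st : List Nat) (res : Int), k ≤ s.length →
      st <:+ buildStack s → 0 ≤ res → res ≤ M →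
      (∀ t ∈ buildStack s, t ∉ st → ∃ j' : Nat, k ≤ j' ∧ (j' : Int) - (t : Int) ≤ res) →
      (0 ≤ (backFold s k (st, res)).2 ∧ (backFold s k (st, res)).2 ≤ M) ∧
      (∀ i j t : Nat, i < j → j < k → vAt s i < vAt s j → t ∈ buildStack s →
        t ≤ i → vAt s t ≤ vAt s i → (j : Int) - (i : Int) ≤ (backFold s k (st, res)).2) := by
  intro k
  induction k with
  | zero =>
    intro st res _ _ h0 hM' _
    unfold backFold
    exact ⟨⟨h0, hM'⟩, fun i j t _ hj => absurd hj (Nat.not_lt_zero j)⟩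
  | succ k ih =>
    intro st res hk hsuf h0 hres hpop
    rw [backFold_succ']
    have hk' : k < s.length := hk
    have hstlt : ∀ t ∈ st, t < s.length := fun t ht =>
      buildStack_lt s t (hsuf.subset ht)
    have hsuf' : (popLoop s k st res).1 <:+ buildStack s :=
      (popLoop_suffix s k st res).trans hsuf
    have h0' : 0 ≤ (popLoop s k st res).2 :=
      le_trans h0 (popLoop_res_mono s k st res)
    have hres' : (popLoop s k st res).2 ≤ M :=
      popLoop_le s M hM hp k hk' st res hres
    have hpop' : ∀ t ∈ buildStack s, t ∉ (popLoop s k st res).1 →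
        ∃ j' : Nat, k ≤ j' ∧ (j' : Int) - (t : Int) ≤ (popLoop s k st res).2 := by
      intro t ht htn
      by_cases hts : t ∈ st
      · rcases popLoop_mem_or s k st res t hts with h | h
        · exact absurd h htn
        · exact ⟨k, le_refl k, h⟩
      · obtain ⟨j', hj1, hj2⟩ := hpop t ht hts
        exact ⟨j', Nat.le_of_succ_le hj1,
          le_trans hj2 (popLoop_res_mono s k st res)⟩
    obtain ⟨hbounds, hpair⟩ := ih (popLoop s k st res).1 (popLoop s k st res).2
      (le_of_lt hk') hsuf' h0' hres' hpop'
    refine ⟨hbounds, ?_⟩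
    intro i j t hij hjk hv ht hti hvt
    rcases Nat.lt_succ_iff_lt_or_eq.mp hjk with h | h
    · exact hpair i j t hij h hv ht hti hvt
    · subst h
      have hvtj : vAt s t < vAt s j := lt_of_le_of_lt hvt hv
      by_cases hts : t ∈ st
      · have hpw : List.Pairwise (stackRel s) st :=
          (buildStack_pairwise s).sublist hsuf.sublist
        have := popLoop_pops s j st res t hpw hts hvtj
        have hmono := backFold_mono' s j (popLoop s j st res).1 (popLoop s j st res).2
        have hti' : (t : Int) ≤ (i : Int) := by exact_mod_cast hti
        omega
      · obtain ⟨j', hj1, hj2⟩ := hpop t ht hts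
        have hmono := backFold_mono' s j (popLoop s j st res).1 (popLoop s j st res).2
        have hmono2 := popLoop_res_mono s j st res
        have : (j : Int) - (i : Int) ≤ (j' : Int) - (t : Int) := by
          have : (j : Int) + 1 ≤ (j' : Int) := by exact_mod_cast hj1
          have hti' : (t : Int) ≤ (i : Int) := by exact_mod_cast hti
          omega
        omega

-- ---------- core equality ----------
theorem core_eq (s : List Int) :
    (backFold s s.length (buildStack s, 0)).2 = bruteRes s := by
  have hmain := backFold_main s (bruteRes s) (bruteRes_nonneg s) (bruteRes_pairBound s)
    s.length (buildStack s) 0 (le_refl _) (List.suffix_refl _) (le_refl 0)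
    (bruteRes_nonneg s) (fun t ht htn => absurd ht htn)
  obtain ⟨⟨h0, hle⟩, hpair⟩ := hmain
  refine le_antisymm hle (bruteRes_le s _ h0 ?_)
  intro i j hij hj hv
  obtain ⟨t, ht, hti, hvt⟩ := buildStack_cov s i (lt_trans hij hj)
  exact hpair i j t hij hj hv ht hti hvt

-- ---------- the two prefix arrays agree ----------
theorem foldP_length : ∀ (hours acc : List Int),
    (hours.foldl (fun p h => p ++ [p.getLastD 0 + pyStep h]) acc).length
      = acc.length + hours.length := by
  intro hours
  induction hours with
  | nil => intro acc; simp
  | cons h t ih =>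
    intro acc
    simp only [List.foldl_cons]
    rw [ih]
    simp
    omega

theorem buildP_length (hours : List Int) : (buildP hours).length = hours.length + 1 := by
  unfold buildP
  rw [foldP_length]
  simp [Nat.add_comm]

theorem buildP_snoc (hs : List Int) (h : Int) :
    buildP (hs ++ [h]) = buildP hs ++ [(buildP hs).getLastD 0 + pyStep h] := by
  unfold buildP
  rw [List.foldl_append]
  rfl

theorem getD_pred_getLastD : ∀ (l : List Int), l ≠ [] →
    l.getD (l.length - 1) 0 = l.getLastD 0 := by
  intro l
  induction l using List.reverseRecOn with
  | nil => intro h; exact absurd rfl h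
  | append_singleton ys y _ => intro _; simp

theorem setfold_append (hrs : List Int) (h : Int) :
    ∀ (ks : List Nat) (acc : List Int) (x : Int),
      (∀ k ∈ ks, 1 ≤ k ∧ k ≤ hrs.length ∧ k < acc.length) →
      ks.foldl (fun sa i => sa.set i (sa.getD (i - 1) 0 + pyStep ((hrs ++ [h]).getD (i - 1) 0)))
          (acc ++ [x])
        = (ks.foldl (fun sa i => sa.set i (sa.getD (i - 1) 0 + pyStep (hrs.getD (i - 1) 0))) acc)
            ++ [x] := by
  intro ks
  induction ks with
  | nil => intro acc x _; rfl
  | cons k t ih =>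
    intro acc x hks
    obtain ⟨hk1, hk2, hk3⟩ := hks k List.mem_cons_self
    simp only [List.foldl_cons]
    rw [List.getD_append _ _ _ _ (by omega), List.getD_append _ _ _ _ (by omega),
      List.set_append_left _ _ (by omega)]
    rw [ih (acc.set k _) x]
    intro u hu
    obtain ⟨h1, h2, h3⟩ := hks u (List.mem_cons_of_mem _ hu)
    exact ⟨h1, h2, by simpa using h3⟩

theorem sum_eq_p : ∀ (hours : List Int), buildSumArray hours = buildP hours := by
  intro hours
  induction hours using List.reverseRecOn with
  | nil => rfl
  | append_singleton hs h ih =>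
    have hm : (hs ++ [h]).length = hs.length + 1 := by simp
    unfold buildSumArray
    rw [hm, List.range'_1_concat, List.foldl_append, List.replicate_succ',
      setfold_append hs h _ _ _ (fun k hk => by
        have := List.mem_range'_1.mp hk
        simp only [List.length_replicate]
        omega)]
    have ihfold :
        (List.range' 1 hs.length).foldl
          (fun sa i => sa.set i (sa.getD (i - 1) 0 + pyStep (hs.getD (i - 1) 0)))
          (List.replicate (hs.length + 1) 0) = buildP hs := ih
    rw [ihfold]
    simp only [List.foldl_cons, List.foldl_nil]
    have hP : (buildP hs).length = hs.length + 1 := buildP_length hs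
    have h1 : (1 + hs.length - 1) = hs.length := by omega
    rw [h1]
    rw [List.getD_append _ _ _ _ (by omega)]
    have hgetlast : (buildP hs).getD hs.length 0 = (buildP hs).getLastD 0 := by
      have := getD_pred_getLastD (buildP hs) (by
        intro hnil
        rw [hnil] at hP
        simp at hP)
      rwa [hP] at this
      
    have hh : (hs ++ [h]).getD hs.length 0 = h := by simp
    rw [hgetlast, hh]
    have hset : (buildP hs ++ [(0 : Int)]).set (1 + hs.length)
        ((buildP hs).getLastD 0 + pyStep h)
        = buildP hs ++ [(buildP hs).getLastD 0 + pyStep h] := by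
      have : 1 + hs.length = (buildP hs).length := by omega
      rw [this]
      simp
    rw [hset, ← buildP_snoc]

-- ===== VERDICT (by name: the statement is the Claim_ definition above) =====
theorem longestWPI_spec : Claim_equal_longestWPI := by
  intro hours _
  unfold Spec_longestWPI
  show (backFold (buildSumArray hours) (buildSumArray hours).length
      (buildStack (buildSumArray hours), 0)).2 = bruteRes (buildP hours)
  rw [sum_eq_p, core_eq]
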